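-- pv_equiv track=rewrite | github.com/Akhil-025/hearth | hearth/modules/command_indexer.py | categorize_commands
-- ===== SOURCE A (Python) =====
-- CATEGORY_KEYWORDS = {
--     "📝 Journaling": ["log note", "digest", "weekly", "introspect", "mnemo"],
--     "🎮 Life Tracking": ["track", "decay", "level", "status", "skills", "daily ritual"],
--     "🎯 Quests": ["quest", "complete quest", "reset quests", "show quests"],
--     "💰 Wealth": ["log wealth", "plutus"],
--     "📦 Backup & Restore": ["backup"],
--     "🧠 System & Meta": ["help", "launch", "teach", "forget", "rename", "exit", "echo"]
-- }
--
-- def categorize_commands(commands):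
--     categorized = {k: [] for k in CATEGORY_KEYWORDS}
--     uncategorized = []
--     for cmd in commands:
--         found = False
--         for cat, keywords in CATEGORY_KEYWORDS.items():
--             if any(cmd["command"].startswith(k) for k in keywords):
--                 categorized[cat].append(cmd)
--                 found = True
--                 break
--         if not found:
--             uncategorized.append(cmd)
--     return categorized, uncategorized
-- ===== SOURCE B (Python) =====
-- CATEGORY_KEYWORDS = {
--     "📝 Journaling": ["log note", "digest", "weekly", "introspect", "mnemo"],
--     "🎮 Life Tracking": ["track", "decay", "level", "status", "skills", "daily ritual"],
--     "🎯 Quests": ["quest", "complete quest", "reset quests", "show quests"],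
--     "💰 Wealth": ["log wealth", "plutus"],
--     "📦 Backup & Restore": ["backup"],
--     "🧠 System & Meta": ["help", "launch", "teach", "forget", "rename", "exit", "echo"]
-- }
--
--
-- def categorize_commands(commands):
--     pairs = [(cat, kw) for cat, kws in CATEGORY_KEYWORDS.items() for kw in kws]
--     labeled = [(next((c for c, kw in pairs if cmd["command"].startswith(kw)), None), cmd)
--                for cmd in commands]
--     categorized = {c: [cmd for lab, cmd in labeled if lab == c]
--                    for c in CATEGORY_KEYWORDS}
--     uncategorized = [cmd for lab, cmd in labeled if lab is None]
--     return categorized, uncategorized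
-- ===== Notes on version B (the rewrite author's own statement) =====
-- stated objective: alternative
-- what changed: B labels each command once against a flat order-preserving (category, keyword) pair list and then builds the result by per-category filtering of the labeled list, replacing A's incremental dict mutation with a nested break loop.
-- outside the precondition, e.g. on categorize_commands([{'cmd': 'track'}]): A raises KeyError, B raises KeyError
import Mathlib
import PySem

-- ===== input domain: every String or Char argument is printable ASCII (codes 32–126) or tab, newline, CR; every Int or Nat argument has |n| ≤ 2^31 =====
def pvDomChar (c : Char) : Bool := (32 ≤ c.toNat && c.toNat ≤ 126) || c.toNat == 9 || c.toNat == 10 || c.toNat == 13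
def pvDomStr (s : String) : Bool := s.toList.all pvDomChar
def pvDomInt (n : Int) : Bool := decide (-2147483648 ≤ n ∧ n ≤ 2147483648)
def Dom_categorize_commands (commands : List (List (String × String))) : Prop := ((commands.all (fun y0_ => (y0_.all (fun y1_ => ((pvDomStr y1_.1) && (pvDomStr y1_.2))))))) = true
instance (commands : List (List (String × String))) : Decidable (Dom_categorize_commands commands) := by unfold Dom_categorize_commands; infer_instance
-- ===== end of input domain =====

-- B relabels each command once against a flattened (category, keyword) list and groups by
-- filtering per category (two passes), instead of A's incremental dict mutation with a
-- nested break loop; same cost, different decomposition ("alternative").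

-- module constant CATEGORY_KEYWORDS (shared module context of both programs)
def pvCats : List (String × List String) :=
  [("📝 Journaling", ["log note", "digest", "weekly", "introspect", "mnemo"]),
   ("🎮 Life Tracking", ["track", "decay", "level", "status", "skills", "daily ritual"]),
   ("🎯 Quests", ["quest", "complete quest", "reset quests", "show quests"]),
   ("💰 Wealth", ["log wealth", "plutus"]),
   ("📦 Backup & Restore", ["backup"]),
   ("🧠 System & Meta", ["help", "launch", "teach", "forget", "rename", "exit", "echo"])]

-- cmd["command"]: dict lookup (first match); exact on Pre_ (key present; KeyError excluded)
def pvCmdStr (cmd : List (String × String)) : String :=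
  ((PySem.Dict.mk cmd).get? "command").getD ""

-- ===== PORT A =====
-- A's inner 'for cat, keywords in CATEGORY_KEYWORDS.items(): if any(...): ...; break'
def pvAFind (s : String) : List (String × List String) → Option String
  | [] => none
  | (cat, kws) :: rest =>
      if kws.any (fun k => PySem.Str.startswith s k) then some cat else pvAFind s rest

-- categorized[cat].append(cmd): the dict is the assoc list (all category keys, unique);
-- exact transliteration of an in-place append at key cat
def pvAppendAt (d : List (String × List (List (String × String)))) (cat : String)
    (cmd : List (String × String)) : List (String × List (List (String × String))) :=
  d.map (fun p => if p.1 == cat then (p.1, p.2 ++ [cmd]) else p)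

def pvAStep (st : (List (String × List (List (String × String)))) × (List (List (String × String))))
    (cmd : List (String × String)) :
    (List (String × List (List (String × String)))) × (List (List (String × String))) :=
  match pvAFind (pvCmdStr cmd) pvCats with
  | some cat => (pvAppendAt st.1 cat cmd, st.2)
  | none => (st.1, st.2 ++ [cmd])

def categorize_commands (commands : List (List (String × String))) :
    (List (String × List (List (String × String)))) × (List (List (String × String))) :=
  commands.foldl pvAStep (pvCats.map (fun p => (p.1, ([] : List (List (String × String))))), [])

-- ===== PORT B =====
-- pairs = flattened (category, keyword) list
def pvPairs : List (String × String) :=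
  pvCats.flatMap (fun p => p.2.map (fun kw => (p.1, kw)))

-- next((c for c, kw in pairs if cmd["command"].startswith(kw)), None)
def pvBLabel (cmd : List (String × String)) : Option String :=
  (pvPairs.find? (fun p => PySem.Str.startswith (pvCmdStr cmd) p.2)).map (·.1)

def categorize_commands_alt (commands : List (List (String × String))) :
    (List (String × List (List (String × String)))) × (List (List (String × String))) :=
  let labeled := commands.map (fun cmd => (pvBLabel cmd, cmd))
  (pvCats.map (fun p => (p.1, (labeled.filter (fun e => e.1 == some p.1)).map (·.2))),
   (labeled.filter (fun e => e.1 == none)).map (·.2))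

-- ===== PRECONDITION & SPEC =====
-- Pre_ excludes command dicts missing the key "command": there Python A raises KeyError.
def Pre_categorize_commands (commands : List (List (String × String))) : Prop :=
  ∀ cmd ∈ commands, (PySem.Dict.mk cmd).contains "command" = true

instance (commands : List (List (String × String))) : Decidable (Pre_categorize_commands commands) := by
  unfold Pre_categorize_commands; infer_instance

def pvWitness_categorize_commands : List (List (String × String)) :=
  [[("command", "track hp")], [("command", "xyz")]]

def Spec_categorize_commands (commands : List (List (String × String))) (out : (List (String × List (List (String × String)))) × (List (List (String × String)))) : Prop := out = categorize_commands_alt commands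
instance (commands : List (List (String × String))) (out : (List (String × List (List (String × String)))) × (List (List (String × String)))) : Decidable (Spec_categorize_commands commands out) := by unfold Spec_categorize_commands; infer_instance

-- ===== CLAIM (what is proved, stated in full; the proofs are below) =====
def Claim_equal_categorize_commands : Prop := ∀ (commands : List (List (String × String))), Dom_categorize_commands commands → Pre_categorize_commands commands → Spec_categorize_commands commands (categorize_commands commands)

-- ===== LEMMAS AND PROOFS =====

-- first match within one category block of the flattened pair list
lemma find_map_pair (s cat : String) (kws : List String) :
    (((kws.map (fun kw => (cat, kw))).find? (fun p => PySem.Str.startswith s p.2)).map (·.1))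
      = if kws.any (fun k => PySem.Str.startswith s k) then some cat else none := by
  induction kws with
  | nil => simp
  | cons k t ih =>
      simp only [List.map_cons, List.any_cons]
      by_cases h : PySem.Str.startswith s k = true
      · rw [List.find?_cons_of_pos (by exact h), if_pos (Bool.or_inl h)]
        rfl
      · rw [List.find?_cons_of_neg (by exact h), ih]
        by_cases h2 : t.any (fun k => PySem.Str.startswith s k) = true
        · rw [if_pos h2, if_pos (Bool.or_inr h2)]
        · rw [if_neg h2, if_neg (fun hc => (Bool.or_eq_true_iff.mp hc).elim h h2)]

-- first match of the nested loop = first match of the flattened pair list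
lemma aFind_eq_flat (s : String) (cats : List (String × List String)) :
    pvAFind s cats =
      ((cats.flatMap (fun p => p.2.map (fun kw => (p.1, kw)))).find?
        (fun p => PySem.Str.startswith s p.2)).map (·.1) := by
  induction cats with
  | nil => rfl
  | cons hd tl ih =>
      obtain ⟨cat, kws⟩ := hd
      show (if kws.any (fun k => PySem.Str.startswith s k) then some cat else pvAFind s tl) = _
      rw [List.flatMap_cons, List.find?_append, Option.map_or, find_map_pair, ih]
      by_cases h : kws.any (fun k => PySem.Str.startswith s k) = true
      · rw [if_pos h, if_pos h, Option.some_or]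
      · rw [if_neg h, if_neg h, Option.none_or]

-- label of a command: A's nested search equals B's flattened search
lemma label_eq (cmd : List (String × String)) :
    pvAFind (pvCmdStr cmd) pvCats = pvBLabel cmd := by
  rw [aFind_eq_flat]; rfl

-- loop invariant of A's fold: every assoc entry collects exactly its matching commands,
-- and the none-labelled commands append to uncategorized, in order
lemma aFold_inv (cmds : List (List (String × String)))
    (d : List (String × List (List (String × String)))) (u : List (List (String × String))) :
    cmds.foldl pvAStep (d, u) =
      (d.map (fun p => (p.1, p.2 ++ cmds.filter (fun c => pvAFind (pvCmdStr c) pvCats == some p.1))),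
       u ++ cmds.filter (fun c => pvAFind (pvCmdStr c) pvCats == none)) := by
  induction cmds generalizing d u with
  | nil => simp
  | cons cmd rest ih =>
      simp only [List.foldl_cons, pvAStep]
      cases h : pvAFind (pvCmdStr cmd) pvCats with
      | none =>
          rw [ih]
          simp [h, List.append_assoc]
      | some cat =>
          rw [ih]
          refine Prod.ext ?_ ?_
          · simp only [pvAppendAt, List.map_map, List.filter_cons, h]
            refine List.map_congr_left (fun p _ => ?_)
            by_cases hp : p.1 == cat
            · have hpc : cat = p.1 := by simpa using (beq_iff_eq.mp hp).symm
              simp [Function.comp, hpc, List.append_assoc]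
            · have hpc : ¬ (some cat == some p.1) = true := by
                simp; intro hc; exact absurd (by simp [hc]) hp
              simp [Function.comp, hp, hpc]
          · simp [h]

-- ===== VERDICT (by name: the statement is the Claim_ definition above) =====
theorem categorize_commands_spec : Claim_equal_categorize_commands := by
  intro commands _ _
  unfold Spec_categorize_commands categorize_commands categorize_commands_alt
  rw [aFold_inv]
  refine Prod.ext ?_ ?_
  · simp only [List.map_map]
    refine List.map_congr_left (fun p _ => ?_)
    simp only [Function.comp_def, List.nil_append, List.filter_map, List.map_map]
    simp [label_eq]
  · simp only [List.nil_append, List.filter_map, List.map_map, Function.comp_def]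
    simp [label_eq]
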